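-- pv_equiv track=rewrite | github.com/BenjaminCantero/funciones | core.py | limpiar_input
-- ===== SOURCE A (Python) =====
-- def limpiar_input(raw: str) -> str:
--     """
--     Limpia la entrada del usuario para sympy.
--     Reemplaza '^' por '**', elimina espacios y agrega '*' donde falta.
--     """
--     s = raw.strip()
--     s = s.replace('^', '**')
--     s = s.replace(' ', '')
--     out = ""
--     for i, ch in enumerate(s):
--         out += ch
--         if i+1 < len(s):
--             a, b = ch, s[i+1]
--             if (a.isdigit() or a == ')') and (b == 'x' or b == '('):
--                 out += '*'
--             if a == 'x' and (b.isdigit() or b == 'x' or b == '('):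
--                 out += '*'
--     out = out.replace('**', '^TEMP^').replace('* *', '*').replace('^TEMP^', '**')
--     return out
-- ===== SOURCE B (Python) =====
-- import re
--
-- def limpiar_input(raw: str) -> str:
--     """Same normalization via one zero-width regex substitution instead of the
--     char-by-char loop; the '** / * *' cleanup is dropped (it is a no-op)."""
--     s = raw.strip().replace('^', '**').replace(' ', '')
--     return re.sub(r'(?<=[0-9)])(?=[x(])|(?<=x)(?=[0-9x(])', '*', s)
-- ===== Notes on version B (the rewrite author's own statement) =====
-- stated objective: idiomatic
-- what changed: The explicit enumerate/index loop with string concatenation and the trailing temp-marker cleanup pass are replaced by a single zero-width lookbehind/lookahead regex substitution; the cleanup pass is dropped because it is a proven no-op (the string contains no spaces and no caret at that point).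
import Mathlib
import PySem

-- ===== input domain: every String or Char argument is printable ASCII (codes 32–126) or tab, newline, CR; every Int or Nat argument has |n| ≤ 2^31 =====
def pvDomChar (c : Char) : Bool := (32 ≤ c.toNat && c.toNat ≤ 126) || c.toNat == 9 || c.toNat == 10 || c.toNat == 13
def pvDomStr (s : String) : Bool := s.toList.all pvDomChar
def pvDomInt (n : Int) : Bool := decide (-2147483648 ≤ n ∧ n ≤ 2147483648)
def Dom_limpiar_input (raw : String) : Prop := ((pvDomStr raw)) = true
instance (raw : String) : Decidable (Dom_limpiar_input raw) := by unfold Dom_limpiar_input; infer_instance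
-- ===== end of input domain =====

-- B replaces A's explicit indexed loop and its '**'/'* *' temp-marker cleanup by a single
-- zero-width-lookaround regex substitution (the cleanup is proved here to be a no-op); objective: idiomatic.

-- ===== PORT A =====
-- the body of A's 'for i, ch in enumerate(s)' loop (out is the accumulator, p = (i, ch))
def pvStepA (s : List Char) (out : List Char) (p : Int × Char) : List Char :=
  let i := p.1
  let ch := p.2
  let out := out ++ [ch]
  if i + 1 < PySem.Chars.len s then
    let a := ch
    -- s[i+1]: the guard keeps the index in range, so the default of pyGetD is never used
    let b := PySem.List.pyGetD s (i + 1) ' '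
    let out := if (PySem.Chars.isdigit a || a == ')') && (b == 'x' || b == '(') then out ++ ['*'] else out
    let out := if a == 'x' && (PySem.Chars.isdigit b || b == 'x' || b == '(') then out ++ ['*'] else out
    out
  else out

def limpiar_input (raw : String) : String :=
  let s := PySem.Chars.replace (PySem.Chars.replace (PySem.Chars.strip raw.toList) ['^'] ['*', '*']) [' '] []
  let out := (PySem.List.enumerate s).foldl (pvStepA s) []
  let out := PySem.Chars.replace (PySem.Chars.replace (PySem.Chars.replace out ['*', '*'] ['^', 'T', 'E', 'M', 'P', '^']) ['*', ' ', '*'] ['*']) ['^', 'T', 'E', 'M', 'P', '^'] ['*', '*']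
  String.ofList out

-- ===== PORT B =====
-- the regex alternation '(?<=[0-9)])(?=[x(])|(?<=x)(?=[0-9x(])' tested at the gap between a and b
-- (the class [0-9] is exactly PySem.Chars.isdigit, i.e. '0' ≤ c ≤ '9')
def pvLook (a b : Char) : Bool :=
  ((PySem.Chars.isdigit a || a == ')') && (b == 'x' || b == '(')) ||
  (a == 'x' && (PySem.Chars.isdigit b || b == 'x' || b == '('))

-- hand port of re.sub with the zero-width pattern (exact: a zero-width match inserts '*' at the
-- gap and the scan advances one character)
def pvSub : List Char → List Char
  | [] => []
  | [a] => [a]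
  | a :: b :: rest => a :: (if pvLook a b then '*' :: pvSub (b :: rest) else pvSub (b :: rest))

def limpiar_input_alt (raw : String) : String :=
  let s := PySem.Chars.replace (PySem.Chars.replace (PySem.Chars.strip raw.toList) ['^'] ['*', '*']) [' '] []
  String.ofList (pvSub s)

-- ===== PRECONDITION & SPEC =====
def Spec_limpiar_input (raw : String) (out : String) : Prop := out = limpiar_input_alt raw
instance (raw : String) (out : String) : Decidable (Spec_limpiar_input raw out) := by unfold Spec_limpiar_input; infer_instance

-- ===== CLAIM (what is proved, stated in full; the proofs are below) =====
def Claim_equal_limpiar_input : Prop := ∀ (raw : String), Dom_limpiar_input raw → Spec_limpiar_input raw (limpiar_input raw)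

-- ===== LEMMAS AND PROOFS =====

-- simple recursive form of PySem.Chars.replace for a nonempty pattern c0 :: old'
def pvRepS (c0 : Char) (old' new : List Char) : List Char → List Char
  | [] => []
  | c :: t =>
    if (c0 :: old').isPrefixOf (c :: t) then new ++ pvRepS c0 old' new (t.drop old'.length)
    else c :: pvRepS c0 old' new t
termination_by l => l.length
decreasing_by
  · simp only [List.length_drop, List.length_cons]; omega
  · simp only [List.length_cons]; omega

lemma pvRepS_nil (c0 : Char) (old' new : List Char) : pvRepS c0 old' new [] = [] := by
  rw [pvRepS.eq_def]

lemma pvRepS_cons (c0 c : Char) (old' new t : List Char) :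
    pvRepS c0 old' new (c :: t) =
    (if (c0 :: old').isPrefixOf (c :: t) then new ++ pvRepS c0 old' new (t.drop old'.length)
     else c :: pvRepS c0 old' new t) := by
  rw [pvRepS.eq_def]

lemma pvGo_eq (c0 : Char) (old' new : List Char) :
    ∀ (fuel : Nat) (l acc : List Char), l.length ≤ fuel →
      PySem.Chars.replace.go (c0 :: old') new fuel l acc = acc.reverse ++ pvRepS c0 old' new l := by
  intro fuel
  induction fuel with
  | zero =>
    intro l acc h
    have hl : l = [] := List.eq_nil_of_length_eq_zero (Nat.le_zero.mp h)
    subst hl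
    simp [PySem.Chars.replace.go, pvRepS_nil]
  | succ n ih =>
    intro l acc h
    cases l with
    | nil => simp [PySem.Chars.replace.go, pvRepS_nil]
    | cons c t =>
      rw [PySem.Chars.replace.go]
      by_cases hp : (c0 :: old').isPrefixOf (c :: t) = true
      · rw [if_pos hp, ih _ _ (by simp at h ⊢; omega)]
        rw [pvRepS_cons, if_pos hp]
        simp
      · rw [if_neg hp, ih _ _ (by simp at h; omega)]
        rw [pvRepS_cons, if_neg hp]
        simp

lemma pvReplace_eq (c0 : Char) (old' new l : List Char) :
    PySem.Chars.replace l (c0 :: old') new = pvRepS c0 old' new l := by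
  simp only [PySem.Chars.replace, List.isEmpty_cons, if_false, Bool.false_eq_true]
  simpa using pvGo_eq c0 old' new l.length l [] le_rfl

lemma pvRepS_mem {c0 : Char} {old' new l : List Char} {c : Char}
    (h : c ∈ pvRepS c0 old' new l) : c ∈ l ∨ c ∈ new := by
  fun_induction pvRepS c0 old' new l with
  | case1 => simp at h
  | case2 c t hp ih =>
    rcases List.mem_append.mp h with h1 | h1
    · exact Or.inr h1
    · rcases ih h1 with h2 | h2
      · exact Or.inl (List.mem_cons_of_mem _ (List.mem_of_mem_drop h2))
      · exact Or.inr h2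
  | case3 c t hp ih =>
    rcases List.mem_cons.mp h with h1 | h1
    · exact Or.inl (h1 ▸ List.mem_cons_self)
    · rcases ih h1 with h2 | h2
      · exact Or.inl (List.mem_cons_of_mem _ h2)
      · exact Or.inr h2

lemma pvRepS_no_occ {c0 : Char} {old' new l : List Char} (d : Char)
    (hd : d ∈ c0 :: old') (h : d ∉ l) : pvRepS c0 old' new l = l := by
  fun_induction pvRepS c0 old' new l with
  | case1 => rfl
  | case2 c t hp ih =>
    exact absurd ((List.isPrefixOf_iff_prefix.mp hp).subset hd) h
  | case3 c t hp ih =>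
    rw [ih (fun hm => h (List.mem_cons_of_mem _ hm))]

lemma pvRepS_single_not_mem {d : Char} {new l : List Char} (hd : d ∉ new) :
    d ∉ pvRepS d [] new l := by
  fun_induction pvRepS d [] new l with
  | case1 => simp
  | case2 c t hp ih =>
    intro hm
    rcases List.mem_append.mp hm with h1 | h1
    · exact hd h1
    · exact ih h1
  | case3 c t hp ih =>
    intro hm
    rcases List.mem_cons.mp hm with h1 | h1
    · exact hp (by simp [h1])
    · exact ih h1

lemma pvRepS_roundtrip {l : List Char} (h : '^' ∉ l) :
    pvRepS '^' ['T', 'E', 'M', 'P', '^'] ['*', '*']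
      (pvRepS '*' ['*'] ['^', 'T', 'E', 'M', 'P', '^'] l) = l := by
  fun_induction pvRepS '*' ['*'] ['^', 'T', 'E', 'M', 'P', '^'] l with
  | case1 => exact pvRepS_nil _ _ _
  | case2 c t hp ih =>
    -- "**" is a prefix: c = '*', t = '*' :: t'
    rw [List.isPrefixOf_iff_prefix, List.cons_prefix_cons] at hp
    obtain ⟨hc, hp'⟩ := hp
    rcases t with _ | ⟨c2, t'⟩
    · simp at hp'
    · rw [List.cons_prefix_cons] at hp'
      obtain ⟨hc2, -⟩ := hp'
      subst hc hc2
      have h' : '^' ∉ t' := fun hm => h (List.mem_cons_of_mem _ (List.mem_cons_of_mem _ hm))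
      simp only [List.length_cons, List.length_nil, List.drop_succ_cons, List.drop_zero] at ih ⊢
      simp only [List.cons_append, List.nil_append]
      rw [pvRepS_cons]
      rw [if_pos (by
        simp only [List.isPrefixOf_iff_prefix, List.cons_prefix_cons, true_and]
        exact List.nil_prefix)]
      simp only [List.length_cons, List.length_nil, List.drop_succ_cons, List.drop_zero]
      rw [ih h']
      rfl
  | case3 c t hp ih =>
    have hc : c ≠ '^' := fun hc => h (hc ▸ List.mem_cons_self)
    rw [pvRepS_cons]
    rw [if_neg (by
      simp only [List.isPrefixOf_iff_prefix, List.cons_prefix_cons]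
      rintro ⟨hcc, -⟩
      exact hc hcc.symm)]
    rw [ih (fun hm => h (List.mem_cons_of_mem _ hm))]

lemma pvSub_mem {l : List Char} {c : Char} (h : c ∈ pvSub l) : c ∈ l ∨ c = '*' := by
  fun_induction pvSub l with
  | case1 => simp at h
  | case2 a => simp at h; exact Or.inl (by simp [h])
  | case3 a b rest ih =>
    rcases List.mem_cons.mp h with h1 | h1
    · exact Or.inl (h1 ▸ List.mem_cons_self)
    · by_cases hl : pvLook a b = true
      · rw [if_pos hl] at h1
        rcases List.mem_cons.mp h1 with h2 | h2
        · exact Or.inr h2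
        · rcases ih h2 with h3 | h3
          · exact Or.inl (List.mem_cons_of_mem _ h3)
          · exact Or.inr h3
      · rw [if_neg hl] at h1
        rcases ih h1 with h3 | h3
        · exact Or.inl (List.mem_cons_of_mem _ h3)
        · exact Or.inr h3

lemma pvLoop (s : List Char) :
    ∀ (tail : List Char) (k : Nat) (acc : List Char), s.drop k = tail →
      List.foldl (pvStepA s) acc (PySem.List.enumerate tail (k : Int)) = acc ++ pvSub tail := by
  intro tail
  induction tail with
  | nil => intro k acc _; simp [PySem.List.enumerate, pvSub]
  | cons ch rest ih =>
    intro k acc hdrop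
    have hlen : s.length = k + 1 + rest.length := by
      have h1 : (s.drop k).length = s.length - k := List.length_drop
      have h2 : k ≤ s.length := by
        by_contra hk
        rw [List.drop_eq_nil_of_le (by omega)] at hdrop
        exact List.cons_ne_nil _ _ hdrop.symm
      rw [hdrop] at h1
      simp at h1
      omega
    have hdrop1 : s.drop (k + 1) = rest := by
      rw [← List.tail_drop, hdrop]
      rfl
    rw [PySem.List.enumerate_cons, List.foldl_cons]
    have hcast : (k : Int) + 1 = ((k + 1 : Nat) : Int) := by push_cast; ring
    cases rest with
    | nil =>
      -- last character: the guard i+1 < len(s) is false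
      have : pvStepA s acc ((k : Int), ch) = acc ++ [ch] := by
        unfold pvStepA
        rw [if_neg (by simp only [PySem.Chars.len]; simp only [List.length_nil] at hlen; omega)]
      rw [this]
      simp [PySem.List.enumerate, pvSub]
    | cons b rest' =>
      have hb : PySem.List.pyGetD s ((k : Int) + 1) ' ' = b := by
        rw [hcast, PySem.List.pyGetD_natCast]
        have hsome : s[(k+1)]? = some b := by
          have h0 : (s.drop (k+1))[0]? = some b := by rw [hdrop1]; rfl
          rw [List.getElem?_drop] at h0
          simpa using h0
        simp [List.getD, hsome]
      have hstep : pvStepA s acc ((k : Int), ch) =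
          acc ++ [ch] ++ (if pvLook ch b then ['*'] else []) := by
        unfold pvStepA
        rw [if_pos (by simp only [PySem.Chars.len]; simp only [List.length_cons] at hlen; omega)]
        simp only [hb]
        unfold pvLook
        by_cases h1 : ((PySem.Chars.isdigit ch || ch == ')') && (b == 'x' || b == '(')) = true
        · have hch : ¬ (ch == 'x') = true := by
            intro hx
            have : ch = 'x' := by simpa using hx
            subst this
            simp [PySem.Chars.isdigit] at h1
          rw [if_pos h1, if_neg (by simp at hch ⊢; intro hc; exact absurd hc hch), if_pos (by simp [h1])]
        · rw [if_neg h1]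
          by_cases h2 : (ch == 'x' && (PySem.Chars.isdigit b || b == 'x' || b == '(')) = true
          · rw [if_pos h2, if_pos (by simp at h1 h2 ⊢; tauto)]
          · rw [if_neg h2, if_neg (by simp at h1 h2 ⊢; tauto)]
            simp
      rw [hstep, hcast, ih (k + 1) _ hdrop1]
      rw [pvSub]
      by_cases hl : pvLook ch b = true
      · rw [if_pos hl, if_pos hl]; simp
      · rw [if_neg hl, if_neg hl]; simp

-- ===== VERDICT (by name: the statement is the Claim_ definition above) =====
theorem limpiar_input_spec : Claim_equal_limpiar_input := by
  intro raw _
  unfold Spec_limpiar_input limpiar_input limpiar_input_alt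
  set s1 := PySem.Chars.replace (PySem.Chars.strip raw.toList) ['^'] ['*', '*'] with hs1
  set s := PySem.Chars.replace s1 [' '] [] with hs
  have h1 : '^' ∉ s1 := by
    rw [hs1, pvReplace_eq]
    exact pvRepS_single_not_mem (by decide)
  have hsp : ' ' ∉ s := by
    rw [hs, pvReplace_eq]
    exact pvRepS_single_not_mem (by decide)
  have hhat : '^' ∉ s := by
    rw [hs, pvReplace_eq]
    intro hm
    rcases pvRepS_mem hm with h | h
    · exact h1 h
    · simp at h
  have hloop : (PySem.List.enumerate s).foldl (pvStepA s) [] = pvSub s := by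
    simpa using pvLoop s s 0 [] (by simp)
  have hosp : ' ' ∉ pvSub s := by
    intro hm
    rcases pvSub_mem hm with h | h
    · exact hsp h
    · exact absurd h (by decide)
  have hohat : '^' ∉ pvSub s := by
    intro hm
    rcases pvSub_mem hm with h | h
    · exact hhat h
    · exact absurd h (by decide)
  simp only [hloop]
  rw [pvReplace_eq, pvReplace_eq, pvReplace_eq]
  have hmid : ' ' ∉ pvRepS '*' ['*'] ['^', 'T', 'E', 'M', 'P', '^'] (pvSub s) := by
    intro hm
    rcases pvRepS_mem hm with h | h
    · exact hosp h
    · exact absurd h (by decide)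
  rw [pvRepS_no_occ ' ' (by decide) hmid]
  rw [pvRepS_roundtrip hohat]
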